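-- pv_equiv track=rewrite | github.com/Samuel-Jeong/MysqlTestDataProvisioner | mysql-test-data-provisioner.py | _split_create_table_blocks
-- ===== SOURCE A (Python) =====
-- from typing import Dict, List, Any, Optional, Tuple
--
-- def _split_create_table_blocks(sql: str) -> List[str]:
--     blocks = []
--     current = []
--     in_create = False
--
--     for line in sql.splitlines():
--         stripped = line.strip()
--         if stripped.upper().startswith("CREATE TABLE"):
--             if current:
--                 blocks.append("\n".join(current))
--                 current = []
--             in_create = True
--         if in_create:
--             current.append(line)
--             if stripped.endswith(";"):
--                 blocks.append("\n".join(current))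
--                 current = []
--                 in_create = False
--
--     if current:
--         blocks.append("\n".join(current))
--
--     return blocks
-- ===== SOURCE B (Python) =====
-- def _split_create_table_blocks(sql):
--     lines = sql.splitlines()
--     n = len(lines)
--     blocks = []
--     i = 0
--     while i < n:
--         line = lines[i]
--         s = line.strip()
--         i += 1
--         if not s.upper().startswith("CREATE TABLE"):
--             continue
--         if s.endswith(";"):
--             blocks.append(line)
--             continue
--         block = [line]
--         while i < n:
--             nxt = lines[i]
--             ns = nxt.strip()
--             if ns.upper().startswith("CREATE TABLE"):
--                 break
--             block.append(nxt)
--             i += 1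
--             if ns.endswith(";"):
--                 break
--         blocks.append("\n".join(block))
--     return blocks
-- ===== Notes on version B (the rewrite author's own statement) =====
-- stated objective: alternative
-- what changed: Replaces A's single fold carrying (blocks, current, in_create) state by a stateless two-level scan: an outer loop that skips to the next CREATE TABLE line and an inner loop that collects that block's lines until a semicolon-terminated line or the next CREATE TABLE line.
import Mathlib
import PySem

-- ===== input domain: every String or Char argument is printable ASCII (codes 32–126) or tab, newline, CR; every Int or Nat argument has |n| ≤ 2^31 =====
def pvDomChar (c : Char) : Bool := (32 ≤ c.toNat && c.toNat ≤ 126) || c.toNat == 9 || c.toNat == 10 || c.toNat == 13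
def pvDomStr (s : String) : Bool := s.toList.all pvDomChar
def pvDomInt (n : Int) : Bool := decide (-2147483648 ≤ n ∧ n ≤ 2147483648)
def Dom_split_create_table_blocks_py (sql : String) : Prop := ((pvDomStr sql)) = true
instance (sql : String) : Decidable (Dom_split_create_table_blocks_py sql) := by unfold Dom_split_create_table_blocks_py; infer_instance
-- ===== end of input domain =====

-- B replaces A's in_create-flag fold by a two-level scan (outer scan finds the next CREATE
-- TABLE line, inner scan collects that block's lines); alternative decomposition, same cost.

-- ===== PORT A =====
-- one iteration of A's for-loop over the state (blocks, current, in_create)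
def pvStepA (st : List String × List String × Bool) (line : String) :
    List String × List String × Bool :=
  let stripped := PySem.Str.strip line
  let st1 :=
    if PySem.Str.startswith (PySem.Str.upper stripped) "CREATE TABLE" then
      ((if st.2.1 ≠ [] then st.1 ++ [PySem.Str.join "\n" st.2.1] else st.1),
        ([] : List String), true)
    else st
  if st1.2.2 then
    let cur := st1.2.1 ++ [line]
    if PySem.Str.endswith stripped ";" then
      (st1.1 ++ [PySem.Str.join "\n" cur], ([] : List String), false)
    else (st1.1, cur, true)
  else st1

def split_create_table_blocks_py (sql : String) : List String :=
  let st := (PySem.Str.splitlines sql).foldl pvStepA ([], [], false)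
  if st.2.1 ≠ [] then st.1 ++ [PySem.Str.join "\n" st.2.1] else st.1

-- ===== PORT B =====
-- inner scan: collect the open block's lines into acc; returns (block lines, unconsumed rest)
def pvInner : List String → List String → List String × List String
  | [], acc => (acc, [])
  | nxt :: rest, acc =>
    let ns := PySem.Str.strip nxt
    if PySem.Str.startswith (PySem.Str.upper ns) "CREATE TABLE" then (acc, nxt :: rest)
    else if PySem.Str.endswith ns ";" then (acc ++ [nxt], rest)
    else pvInner rest (acc ++ [nxt])

theorem pvInner_len : ∀ (ls acc : List String), (pvInner ls acc).2.length ≤ ls.length := by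
  intro ls
  induction ls with
  | nil => intro acc; simp [pvInner]
  | cons nxt rest ih =>
    intro acc
    simp only [pvInner]
    split_ifs
    · simp
    · simp
    · exact Nat.le_succ_of_le (ih _)

-- outer scan: skip to the next CREATE TABLE line, emit its block, continue after it
def pvOuter : List String → List String
  | [] => []
  | line :: rest =>
    let s := PySem.Str.strip line
    if PySem.Str.startswith (PySem.Str.upper s) "CREATE TABLE" then
      if PySem.Str.endswith s ";" then line :: pvOuter rest
      else
        let p := pvInner rest [line]
        PySem.Str.join "\n" p.1 :: pvOuter p.2
    else pvOuter rest
termination_by ls => ls.length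
decreasing_by
  · simp
  · exact Nat.lt_succ_of_le (pvInner_len _ _)
  · simp

def split_create_table_blocks_py_alt (sql : String) : List String :=
  pvOuter (PySem.Str.splitlines sql)

-- ===== PRECONDITION & SPEC =====
def Spec_split_create_table_blocks_py (sql : String) (out : List String) : Prop := out = split_create_table_blocks_py_alt sql
instance (sql : String) (out : List String) : Decidable (Spec_split_create_table_blocks_py sql out) := by unfold Spec_split_create_table_blocks_py; infer_instance

-- ===== CLAIM (what is proved, stated in full; the proofs are below) =====
def Claim_equal_split_create_table_blocks_py : Prop := ∀ (sql : String), Dom_split_create_table_blocks_py sql → Spec_split_create_table_blocks_py sql (split_create_table_blocks_py sql)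

-- ===== LEMMAS AND PROOFS =====

def pvFinish (st : List String × List String × Bool) : List String :=
  if st.2.1 ≠ [] then st.1 ++ [PySem.Str.join "\n" st.2.1] else st.1

theorem pvJoin_singleton (x : String) : PySem.Str.join "\n" [x] = x := by
  simp [PySem.Str.join]

-- the combined loop invariant: from a closed state A's fold computes pvOuter; from an open
-- state (current = cur ≠ [], in_create) it computes pvInner's block and then pvOuter
theorem pvMain : ∀ (n : ℕ) (lines : List String), lines.length ≤ n →
    (∀ blocks, pvFinish (lines.foldl pvStepA (blocks, [], false)) = blocks ++ pvOuter lines) ∧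
    (∀ blocks cur, cur ≠ [] →
      pvFinish (lines.foldl pvStepA (blocks, cur, true)) =
        blocks ++ (PySem.Str.join "\n" (pvInner lines cur).1 :: pvOuter (pvInner lines cur).2)) := by
  intro n
  induction n with
  | zero =>
    intro lines hl
    have : lines = [] := List.eq_nil_of_length_eq_zero (Nat.le_zero.mp hl)
    subst this
    constructor
    · intro blocks; simp [pvFinish, pvOuter]
    · intro blocks cur hc; simp [pvFinish, pvInner, pvOuter, hc]
  | succ n ih =>
    intro lines hl
    cases lines with
    | nil =>
      constructor
      · intro blocks; simp [pvFinish, pvOuter]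
      · intro blocks cur hc; simp [pvFinish, pvInner, pvOuter, hc]
    | cons line rest =>
      have hr : rest.length ≤ n := Nat.le_of_succ_le_succ hl
      constructor
      · intro blocks
        simp only [List.foldl_cons]
        by_cases hC : PySem.Chars.startswith (PySem.Chars.upper (PySem.Chars.strip line.toList))
            ['C', 'R', 'E', 'A', 'T', 'E', ' ', 'T', 'A', 'B', 'L', 'E'] = true
        · by_cases hE : PySem.Chars.endswith (PySem.Chars.strip line.toList) [';'] = true
          · have : pvStepA (blocks, [], false) line = (blocks ++ [PySem.Str.join "\n" [line]], [], false) := by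
              simp [pvStepA, hC, hE]
            rw [this, (ih rest hr).1, pvJoin_singleton]
            simp [pvOuter, hC, hE]
          · have : pvStepA (blocks, [], false) line = (blocks, [line], true) := by
              simp [pvStepA, hC, hE]
            rw [this, (ih rest hr).2 blocks [line] (by simp)]
            simp [pvOuter, hC, hE]
        · have : pvStepA (blocks, [], false) line = (blocks, [], false) := by
            simp [pvStepA, hC]
          rw [this, (ih rest hr).1]
          simp [pvOuter, hC]
      · intro blocks cur hc
        simp only [List.foldl_cons]
        by_cases hC : PySem.Chars.startswith (PySem.Chars.upper (PySem.Chars.strip line.toList))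
            ['C', 'R', 'E', 'A', 'T', 'E', ' ', 'T', 'A', 'B', 'L', 'E'] = true
        · by_cases hE : PySem.Chars.endswith (PySem.Chars.strip line.toList) [';'] = true
          · have : pvStepA (blocks, cur, true) line =
                (blocks ++ [PySem.Str.join "\n" cur] ++ [PySem.Str.join "\n" [line]], [], false) := by
              simp [pvStepA, hC, hE, hc]
            rw [this, (ih rest hr).1, pvJoin_singleton]
            simp [pvInner, pvOuter, hC, hE]
          · have : pvStepA (blocks, cur, true) line =
                (blocks ++ [PySem.Str.join "\n" cur], [line], true) := by
              simp [pvStepA, hC, hE, hc]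
            rw [this, (ih rest hr).2 _ [line] (by simp)]
            simp [pvInner, pvOuter, hC, hE]
        · by_cases hE : PySem.Chars.endswith (PySem.Chars.strip line.toList) [';'] = true
          · have : pvStepA (blocks, cur, true) line =
                (blocks ++ [PySem.Str.join "\n" (cur ++ [line])], [], false) := by
              simp [pvStepA, hC, hE]
            rw [this, (ih rest hr).1]
            simp [pvInner, hC, hE]
          · have : pvStepA (blocks, cur, true) line = (blocks, cur ++ [line], true) := by
              simp [pvStepA, hC, hE]
            rw [this, (ih rest hr).2 _ (cur ++ [line]) (by simp)]
            simp [pvInner, hC, hE]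

-- ===== VERDICT (by name: the statement is the Claim_ definition above) =====
theorem split_create_table_blocks_py_spec : Claim_equal_split_create_table_blocks_py := by
  intro sql _
  unfold Spec_split_create_table_blocks_py split_create_table_blocks_py split_create_table_blocks_py_alt
  exact ((pvMain (PySem.Str.splitlines sql).length _ le_rfl).1 []).trans (by simp)
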